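-- pv_equiv track=rewrite | github.com/MoeenNehzati/video | scripts/make_hiphop_remix.py | duration_chunks
-- ===== SOURCE A (Python) =====
-- def duration_chunks(duration):
--     chunks = []
--     for unit in (24, 12, 6, 3):
--         while duration >= unit:
--             chunks.append(unit)
--             duration -= unit
--     if duration != 0:
--         raise ValueError(f"Unsupported residual duration {duration}")
--     return chunks
-- ===== SOURCE B (Python) =====
-- def duration_chunks(duration):
--     chunks = []
--     for unit in (24, 12, 6, 3):
--         q = duration // unit
--         if q > 0:
--             chunks.extend([unit] * q)
--             duration -= unit * q
--     if duration != 0: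
--         raise ValueError(f"Unsupported residual duration {duration}")
--     return chunks
-- ===== Notes on version B (the rewrite author's own statement) =====
-- stated objective: idiomatic
-- what changed: Replaced each inner repeated-subtraction while loop by a single closed-form floor-division count per unit (extend with [unit]*q and subtract unit*q once), keeping the same chunk order and residual check.
import Mathlib
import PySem

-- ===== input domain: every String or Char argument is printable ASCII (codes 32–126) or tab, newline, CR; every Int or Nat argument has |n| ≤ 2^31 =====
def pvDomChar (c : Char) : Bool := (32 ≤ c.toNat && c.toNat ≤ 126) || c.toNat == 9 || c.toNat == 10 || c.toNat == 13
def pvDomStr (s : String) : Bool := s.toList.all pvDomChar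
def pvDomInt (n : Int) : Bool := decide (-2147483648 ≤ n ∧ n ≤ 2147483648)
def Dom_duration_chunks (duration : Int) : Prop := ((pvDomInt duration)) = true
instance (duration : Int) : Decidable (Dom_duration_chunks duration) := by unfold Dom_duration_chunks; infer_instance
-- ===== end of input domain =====

-- B replaces each inner repeated-subtraction while loop by one closed-form floor-division count per unit (idiomatic; same chunk order and residual check).

-- ===== PORT A =====
-- A's inner `while duration >= unit: chunks.append(unit); duration -= unit`;
-- the `0 < unit` conjunct is a totality guard only (A calls it with 24,12,6,3).
def durWhile (unit : Int) (duration : Int) (chunks : List Int) : List Int × Int :=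
  if _h : 0 < unit ∧ unit ≤ duration then
    durWhile unit (duration - unit) (chunks ++ [unit])
  else
    (chunks, duration)
termination_by duration.toNat
decreasing_by omega

def duration_chunks (duration : Int) : List Int :=
  let s1 := durWhile 24 duration []
  let s2 := durWhile 12 s1.2 s1.1
  let s3 := durWhile 6 s2.2 s2.1
  let s4 := durWhile 3 s3.2 s3.1
  -- `if duration != 0: raise ValueError(...)` — excluded by Pre_duration_chunks
  s4.1

-- ===== PORT B =====
def altStep (st : List Int × Int) (unit : Int) : List Int × Int :=
  let q := PySem.Int.floordiv st.2 unit
  if 0 < q then (st.1 ++ List.replicate q.toNat unit, st.2 - unit * q) else st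

def duration_chunks_alt (duration : Int) : List Int :=
  -- `if duration != 0: raise ValueError(...)` — excluded by Pre_duration_chunks
  (([24, 12, 6, 3] : List Int).foldl altStep ([], duration)).1

-- ===== PRECONDITION & SPEC =====
-- exactly the inputs on which A returns (otherwise A raises ValueError on the residual)
def Pre_duration_chunks (duration : Int) : Prop := 0 ≤ duration ∧ duration % 3 = 0
instance (duration : Int) : Decidable (Pre_duration_chunks duration) := by unfold Pre_duration_chunks; infer_instance
def pvWitness_duration_chunks : Int := (27)

def Spec_duration_chunks (duration : Int) (out : List Int) : Prop := out = duration_chunks_alt duration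
instance (duration : Int) (out : List Int) : Decidable (Spec_duration_chunks duration out) := by unfold Spec_duration_chunks; infer_instance

-- ===== CLAIM (what is proved, stated in full; the proofs are below) =====
def Claim_equal_duration_chunks : Prop := ∀ (duration : Int), Dom_duration_chunks duration → Pre_duration_chunks duration → Spec_duration_chunks duration (duration_chunks duration)

-- ===== LEMMAS AND PROOFS =====

-- A's while loop in closed form: appends (d/u) copies of u and leaves d % u.
theorem durWhile_eq (u : Int) (hu : 0 < u) :
    ∀ (d : Int) (c : List Int), 0 ≤ d →
    durWhile u d c = (c ++ List.replicate (d / u).toNat u, d % u) := by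
  intro d c
  induction d, c using durWhile.induct (unit := u) with
  | case1 d c h ih =>
      intro hd
      rw [durWhile, dif_pos h]
      rw [ih (by omega)]
      have hq : 1 ≤ d / u := by
        rw [Int.le_ediv_iff_mul_le hu]; omega
      have h1 : (d - u) / u = d / u - 1 := by
        have := Int.add_mul_ediv_right d (-1) (by omega : u ≠ 0)
        simpa [sub_eq_add_neg, neg_mul, one_mul] using this
      have h2 : (d - u) % u = d % u := Int.sub_emod_right d u
      have h3 : (d / u).toNat = ((d - u) / u).toNat + 1 := by
        rw [h1]; omega
      simp [h2, h3, List.replicate_succ, List.append_assoc]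
  | case2 d c h =>
      intro hd
      rw [durWhile, dif_neg h]
      have hdu : d / u = 0 := by
        apply Int.ediv_eq_zero_of_lt hd; omega
      have hmod : d % u = d := by
        rw [Int.emod_def, hdu]; ring
      simp [hdu, hmod]

-- B's fold step computes the same closed form.
theorem altStep_eq (u d : Int) (c : List Int) (hu : 0 < u) (hd : 0 ≤ d) :
    altStep (c, d) u = (c ++ List.replicate (d / u).toNat u, d % u) := by
  unfold altStep
  rw [PySem.Int.floordiv_eq_ediv_of_pos hu]
  by_cases hq : 0 < d / u
  · rw [if_pos hq]
    have : d - u * (d / u) = d % u := by rw [Int.emod_def]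
    simp [this]
  · rw [if_neg hq]
    have hq0 : d / u = 0 := le_antisymm (by omega) (Int.ediv_nonneg hd (by omega))
    have hmod : d % u = d := by rw [Int.emod_def, hq0]; ring
    simp [hq0, hmod]

-- ===== VERDICT (by name: the statement is the Claim_ definition above) =====
theorem duration_chunks_spec : Claim_equal_duration_chunks := by
  intro d _ hpre
  obtain ⟨hd, -⟩ := hpre
  unfold Spec_duration_chunks duration_chunks duration_chunks_alt
  have m1 : (0:Int) ≤ d % 24 := Int.emod_nonneg d (by norm_num)
  have m2 : (0:Int) ≤ d % 24 % 12 := Int.emod_nonneg _ (by norm_num)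
  have m3 : (0:Int) ≤ d % 24 % 12 % 6 := Int.emod_nonneg _ (by norm_num)
  simp only [List.foldl]
  rw [altStep_eq 24 d [] (by norm_num) hd,
      altStep_eq 12 _ _ (by norm_num) m1,
      altStep_eq 6 _ _ (by norm_num) m2,
      altStep_eq 3 _ _ (by norm_num) m3,
      durWhile_eq 24 (by norm_num) d [] hd]
  simp only
  rw [durWhile_eq 12 (by norm_num) _ _ m1]
  simp only
  rw [durWhile_eq 6 (by norm_num) _ _ m2]
  simp only
  rw [durWhile_eq 3 (by norm_num) _ _ m3]
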